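-- pv_equiv track=rewrite | github.com/sakamo-wni/MobileCommentGenerator | src/ui/utils/location_utils.py | filter_locations
-- ===== SOURCE A (Python) =====
-- from typing import List
--
-- def filter_locations(locations: List[str], query: str) -> List[str]:
--     """
--     クエリに基づいて地点をフィルタリング
--
--     Args:
--         locations: 地点リスト
--         query: 検索クエリ
--
--     Returns:
--         フィルタリングされた地点リスト
--     """
--     if not query:
--         return locations
--
--     query_lower = query.lower()
--
--     # 完全一致、前方一致、部分一致の順で検索
--     exact_matches = [loc for loc in locations if loc.lower() == query_lower]
--     prefix_matches = [loc for loc in locations if loc.lower().startswith(query_lower) and loc not in exact_matches]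
--     partial_matches = [loc for loc in locations if query_lower in loc.lower() and loc not in exact_matches and loc not in prefix_matches]
--
--     return exact_matches + prefix_matches + partial_matches
-- ===== SOURCE B (Python) =====
-- def filter_locations(locations, query):
--     if not query:
--         return locations
--     q = query.lower()
--     exact, prefix, partial = [], [], []
--     for loc in locations:
--         low = loc.lower()
--         if low == q:
--             exact.append(loc)
--         elif low.startswith(q):
--             prefix.append(loc)
--         elif q in low:
--             partial.append(loc)
--     return exact + prefix + partial
-- ===== Notes on version B (the rewrite author's own statement) =====
-- stated objective: alternative
-- what changed: Replaces A's three full comprehensions with their 'loc not in exact_matches'/'loc not in prefix_matches' list-membership rescans (quadratic in the worst case) by one single pass that classifies each location into exact/prefix/partial buckets with if/elif/elif.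
import Mathlib
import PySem

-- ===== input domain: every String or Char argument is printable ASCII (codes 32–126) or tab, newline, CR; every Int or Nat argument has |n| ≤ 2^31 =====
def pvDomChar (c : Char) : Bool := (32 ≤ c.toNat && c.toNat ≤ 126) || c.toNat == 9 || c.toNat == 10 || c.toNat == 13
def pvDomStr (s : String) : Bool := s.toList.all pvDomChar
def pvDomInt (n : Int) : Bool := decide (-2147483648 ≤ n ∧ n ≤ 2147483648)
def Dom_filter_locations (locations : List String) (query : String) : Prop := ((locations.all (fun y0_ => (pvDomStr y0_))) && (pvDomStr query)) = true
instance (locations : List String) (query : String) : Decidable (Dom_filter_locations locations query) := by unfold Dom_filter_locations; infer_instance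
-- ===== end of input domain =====

-- B replaces A's three comprehensions and their list-membership rescans by one
-- single pass classifying each location into exact/prefix/partial buckets.

-- ===== PORT A =====
def filter_locations (locations : List String) (query : String) : List String :=
  if query = "" then locations
  else
    let query_lower := PySem.Str.lower query
    let exact_matches := locations.filter (fun loc => PySem.Str.lower loc == query_lower)
    let prefix_matches := locations.filter (fun loc =>
      PySem.Str.startswith (PySem.Str.lower loc) query_lower && !(exact_matches.contains loc))
    let partial_matches := locations.filter (fun loc =>
      PySem.Str.isIn query_lower (PySem.Str.lower loc) && !(exact_matches.contains loc)
        && !(prefix_matches.contains loc))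
    exact_matches ++ prefix_matches ++ partial_matches

-- ===== PORT B =====
/-- one classification step of B's loop body -/
def fl_step (q : String) (acc : List String × List String × List String) (loc : String) :
    List String × List String × List String :=
  let low := PySem.Str.lower loc
  if low == q then (acc.1 ++ [loc], acc.2.1, acc.2.2)
  else if PySem.Str.startswith low q then (acc.1, acc.2.1 ++ [loc], acc.2.2)
  else if PySem.Str.isIn q low then (acc.1, acc.2.1, acc.2.2 ++ [loc])
  else acc

def filter_locations_alt (locations : List String) (query : String) : List String :=
  if query = "" then locations
  else
    let q := PySem.Str.lower query
    let acc := locations.foldl (fl_step q) ([], [], [])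
    acc.1 ++ acc.2.1 ++ acc.2.2

-- ===== PRECONDITION & SPEC =====
def Spec_filter_locations (locations : List String) (query : String) (out : List String) : Prop := out = filter_locations_alt locations query
instance (locations : List String) (query : String) (out : List String) : Decidable (Spec_filter_locations locations query out) := by unfold Spec_filter_locations; infer_instance

-- ===== CLAIM (what is proved, stated in full; the proofs are below) =====
def Claim_equal_filter_locations : Prop := ∀ (locations : List String) (query : String), Dom_filter_locations locations query → Spec_filter_locations locations query (filter_locations locations query)

-- ===== LEMMAS AND PROOFS =====

/-- B's fold accumulates the three pure-predicate filters. -/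
lemma fold_inv (q : String) (l : List String) (e p pa : List String) :
    l.foldl (fl_step q) (e, p, pa)
    = (e ++ l.filter (fun loc => PySem.Str.lower loc == q),
       p ++ l.filter (fun loc => !(PySem.Str.lower loc == q)
              && PySem.Str.startswith (PySem.Str.lower loc) q),
       pa ++ l.filter (fun loc => !(PySem.Str.lower loc == q)
              && !(PySem.Str.startswith (PySem.Str.lower loc) q)
              && PySem.Str.isIn q (PySem.Str.lower loc))) := by
  induction l generalizing e p pa with
  | nil => simp
  | cons x xs ih =>
    rw [List.foldl_cons]
    by_cases h1 : PySem.Str.lower x = q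
    · rw [show fl_step q (e, p, pa) x = (e ++ [x], p, pa) from by simp [fl_step, h1], ih]
      simp [List.filter_cons, h1]
    · by_cases h2 : PySem.Chars.startswith (PySem.Chars.lower x.toList) q.toList = true
      · rw [show fl_step q (e, p, pa) x = (e, p ++ [x], pa) from by simp [fl_step, h1, h2], ih]
        simp [List.filter_cons, h1, h2]
      · by_cases h3 : PySem.Chars.isIn q.toList (PySem.Chars.lower x.toList) = true
        · rw [show fl_step q (e, p, pa) x = (e, p, pa ++ [x]) from by
            simp [fl_step, h1, h2, h3], ih]
          simp [List.filter_cons, h1, h2, h3]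
        · rw [show fl_step q (e, p, pa) x = (e, p, pa) from by simp [fl_step, h1, h2, h3], ih]
          simp [List.filter_cons, h1, h2, h3]

/-- Membership in a filter of `locations` is, for `loc ∈ locations`, just the predicate. -/
lemma contains_filter_eq (l : List String) (f : String → Bool) (loc : String)
    (h : loc ∈ l) : (l.filter f).contains loc = f loc := by
  by_cases hf : f loc
  · have hm : loc ∈ l.filter f := List.mem_filter.2 ⟨h, hf⟩
    simp [List.contains_iff_mem, hm, hf]
  · have hm : loc ∉ l.filter f := fun hm => hf (List.mem_filter.1 hm).2
    simp [List.contains_iff_mem, hm, hf]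

theorem a_eq_b (locations : List String) (query : String) :
    filter_locations locations query = filter_locations_alt locations query := by
  by_cases hq : query = ""
  · simp only [filter_locations, filter_locations_alt, if_pos hq]
  · simp only [filter_locations, filter_locations_alt, if_neg hq]
    rw [fold_inv]
    simp only [List.nil_append]
    congr 1
    congr 1
    · apply List.filter_congr
      intro loc hloc
      rw [contains_filter_eq _ _ _ hloc]
      cases h1 : PySem.Str.lower loc == PySem.Str.lower query <;>
        cases h2 : PySem.Str.startswith (PySem.Str.lower loc) (PySem.Str.lower query) <;> simp [h1, h2]
    · apply List.filter_congr
      intro loc hloc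
      rw [contains_filter_eq _ _ _ hloc, contains_filter_eq _ _ _ hloc,
          contains_filter_eq _ _ _ hloc]
      cases h1 : PySem.Str.lower loc == PySem.Str.lower query <;>
        cases h2 : PySem.Str.startswith (PySem.Str.lower loc) (PySem.Str.lower query) <;>
        cases h3 : PySem.Str.isIn (PySem.Str.lower query) (PySem.Str.lower loc) <;> simp [h1, h2, h3]

-- ===== VERDICT (by name: the statement is the Claim_ definition above) =====
theorem filter_locations_spec : Claim_equal_filter_locations := by
  intro locations query _
  unfold Spec_filter_locations
  exact a_eq_b locations query
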